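-- pv_equiv track=rewrite | github.com/Box-Of-Hats/General_Genetic_Algorithm | ExampleUsage.py | alternating_ones_and_zeroes
-- ===== SOURCE A (Python) =====
-- def alternating_ones_and_zeroes(chromosome):
--     """
--     A problem where we want a string to contain alternating 0s and 1s.
--     e.g 10101010101...
--     """
--     fitness = 0
--     for index, c in enumerate(chromosome):
--         if index % 2 == 0:
--             fitness -= c
--         else:
--             fitness += c
--     return fitness
-- ===== SOURCE B (Python) =====
-- def alternating_ones_and_zeroes(chromosome):
--     """
--     A problem where we want a string to contain alternating 0s and 1s.
--     e.g 10101010101...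
--     """
--     seq = list(chromosome)
--     total = 0
--     i = 0
--     while i + 1 < len(seq):
--         total += seq[i + 1] - seq[i]
--         i += 2
--     if len(seq) % 2:
--         total -= seq[-1]
--     return total
-- ===== Notes on version B (the rewrite author's own statement) =====
-- stated objective: alternative
-- what changed: Replaces A's enumerate loop with a per-element index%2 branch by a two-at-a-time index loop adding seq[i+1]-seq[i] per pair, with a final subtraction of the lone last element when the length is odd.
import Mathlib
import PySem

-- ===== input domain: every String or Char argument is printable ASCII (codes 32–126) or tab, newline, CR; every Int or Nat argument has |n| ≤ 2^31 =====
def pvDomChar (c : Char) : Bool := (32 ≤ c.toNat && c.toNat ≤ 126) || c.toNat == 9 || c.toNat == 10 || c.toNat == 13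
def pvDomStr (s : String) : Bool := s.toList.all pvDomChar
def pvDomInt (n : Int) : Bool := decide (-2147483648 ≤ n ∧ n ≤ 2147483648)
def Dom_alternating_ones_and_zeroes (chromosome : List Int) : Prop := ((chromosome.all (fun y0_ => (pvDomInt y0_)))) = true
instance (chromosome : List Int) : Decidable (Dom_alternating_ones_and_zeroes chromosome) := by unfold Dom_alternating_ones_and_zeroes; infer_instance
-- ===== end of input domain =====

-- B replaces the per-element index-parity branch of A by a single two-at-a-time
-- index loop that adds seq[i+1] - seq[i] per pair (objective: alternative decomposition, same cost).

-- ===== PORT A =====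
-- the loop body of A: 'if index % 2 == 0: fitness -= c else: fitness += c'
def pvStepA (fitness : Int) (p : Int × Int) : Int :=
  if PySem.Int.mod p.1 2 = 0 then fitness - p.2 else fitness + p.2

def alternating_ones_and_zeroes (chromosome : List Int) : Int :=
  (PySem.List.enumerate chromosome).foldl pvStepA 0

-- ===== PORT B =====
-- the 'while i + 1 < len(seq): total += seq[i+1] - seq[i]; i += 2' loop of B
def pvLoopB (seq : List Int) (total : Int) (i : Nat) : Int :=
  if h : i + 1 < seq.length then
    pvLoopB seq (total + (seq[i + 1] - seq[i])) (i + 2)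
  else total
termination_by seq.length - i

def alternating_ones_and_zeroes_alt (chromosome : List Int) : Int :=
  let seq := chromosome
  let total := pvLoopB seq 0 0
  if PySem.Int.mod (seq.length : Int) 2 ≠ 0 then total - PySem.List.pyGetD seq (-1) 0
  else total

-- ===== PRECONDITION & SPEC =====
def Spec_alternating_ones_and_zeroes (chromosome : List Int) (out : Int) : Prop := out = alternating_ones_and_zeroes_alt chromosome
instance (chromosome : List Int) (out : Int) : Decidable (Spec_alternating_ones_and_zeroes chromosome out) := by unfold Spec_alternating_ones_and_zeroes; infer_instance

-- ===== CLAIM (what is proved, stated in full; the proofs are below) =====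
def Claim_equal_alternating_ones_and_zeroes : Prop := ∀ (chromosome : List Int), Dom_alternating_ones_and_zeroes chromosome → Spec_alternating_ones_and_zeroes chromosome (alternating_ones_and_zeroes chromosome)

-- ===== LEMMAS AND PROOFS =====

-- reference value: two-at-a-time recursion, lone trailing element subtracted
def pvGo : List Int → Int
  | [] => 0
  | [a] => -a
  | a :: b :: rest => (b - a) + pvGo rest

-- A's fold equals pvGo, generalised over the start index and accumulator
theorem pvFoldA_eq (xs : List Int) : ∀ (s acc : Int),
    (PySem.List.enumerate xs s).foldl pvStepA acc
      = acc + (if PySem.Int.mod s 2 = 0 then pvGo xs else -(pvGo xs)) := by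
  induction xs using pvGo.induct with
  | case1 =>
    intro s acc
    simp [PySem.List.enumerate_nil, pvGo]
  | case2 a =>
    intro s acc
    simp only [PySem.List.enumerate_cons, PySem.List.enumerate_nil, List.foldl, pvGo, pvStepA]
    split_ifs <;> ring
  | case3 a b rest ih =>
    intro s acc
    simp only [PySem.List.enumerate_cons, List.foldl, pvGo]
    rw [ih (s + 1 + 1)]
    have hm : ∀ a : Int, PySem.Int.mod a 2 = a % 2 :=
      fun a => PySem.Int.mod_eq_emod_of_pos (by norm_num)
    have h2 : PySem.Int.mod (s + 1 + 1) 2 = PySem.Int.mod s 2 := by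
      rw [hm, hm]; omega
    have h1 : PySem.Int.mod (s + 1) 2 = 0 ↔ ¬ PySem.Int.mod s 2 = 0 := by
      rw [hm, hm]; omega
    rw [h2]
    simp only [pvStepA, h1]
    split_ifs <;> ring

-- the pair-only sum (no trailing-element correction)
def pvGo' : List Int → Int
  | a :: b :: rest => (b - a) + pvGo' rest
  | _ => 0

-- B's loop starting at index i computes the pair sum of the remaining suffix
theorem pvLoopB_eq (seq : List Int) : ∀ (i : Nat) (total : Int),
    pvLoopB seq total i = total + pvGo' (seq.drop i) := by
  intro i
  induction hn : seq.length - i using Nat.strong_induction_on generalizing i with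
  | _ n ih =>
    intro total
    rw [pvLoopB]
    split_ifs with h
    · have hd : seq.drop i = seq[i] :: seq[i + 1] :: seq.drop (i + 2) := by
        rw [List.drop_eq_getElem_cons (by omega), List.drop_eq_getElem_cons (by omega)]
      rw [ih (seq.length - (i + 2)) (by omega) (i + 2) rfl, hd]
      simp only [pvGo']
      ring
    · have hd : pvGo' (seq.drop i) = 0 := by
        rcases Nat.lt_or_ge i seq.length with hi | hi
        · have h1 : seq.drop (i + 1) = [] := by simp; omega
          rw [List.drop_eq_getElem_cons (by omega), h1]; rfl
        · have : seq.drop i = [] := by simp; omega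
          rw [this]; rfl
      rw [hd]; ring

-- seq[-1] is the last element (nonempty list)
theorem pvGetLast (xs : List Int) (h : xs ≠ []) :
    PySem.List.pyGetD xs (-1) 0 = xs.getLastD 0 := by
  have h1 : 1 ≤ xs.length := List.length_pos_of_ne_nil h
  simp [PySem.List.pyGetD, PySem.List.pyGet?, PySem.List.pyIdx?, h1,
    List.getLast?_eq_getElem?]

-- pvGo is the pair sum minus the lone trailing element when the length is odd
theorem pvGo_eq (xs : List Int) :
    pvGo xs = pvGo' xs - (if (xs.length : Int) % 2 ≠ 0 then xs.getLastD 0 else 0) := by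
  induction xs using pvGo.induct with
  | case1 => simp [pvGo, pvGo']
  | case2 a => simp [pvGo, pvGo']
  | case3 a b rest ih =>
    simp only [pvGo, pvGo', ih]
    have hp : ((a :: b :: rest).length : Int) % 2 = ((rest.length : Int)) % 2 := by
      simp; omega
    rw [hp]
    rcases rest with - | ⟨c, rest'⟩
    · simp
    · have : (c :: rest').getLastD 0 = (a :: b :: c :: rest').getLastD 0 := by simp
      rw [this]; split_ifs <;> ring

-- B equals pvGo
theorem pvAlt_eq (seq : List Int) :
    alternating_ones_and_zeroes_alt seq = pvGo seq := by
  change (if PySem.Int.mod ((seq.length : Int)) 2 ≠ 0 then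
      pvLoopB seq 0 0 - PySem.List.pyGetD seq (-1) 0 else pvLoopB seq 0 0) = pvGo seq
  rw [pvLoopB_eq seq 0 0, pvGo_eq]
  simp only [List.drop_zero]
  by_cases hpar : PySem.Int.mod (seq.length : Int) 2 ≠ 0
  · have hne : seq ≠ [] := by
      intro he; subst he; simp [PySem.Int.mod] at hpar
    have hpar' : ((seq.length : Int)) % 2 ≠ 0 := by
      rwa [PySem.Int.mod_eq_emod_of_pos (by norm_num)] at hpar
    rw [if_pos hpar, if_pos hpar', pvGetLast seq hne]; ring
  · have h0 : PySem.Int.mod (seq.length : Int) 2 = 0 := not_not.mp hpar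
    have hpar' : ¬ ((seq.length : Int)) % 2 ≠ 0 := by
      rw [PySem.Int.mod_eq_emod_of_pos (by norm_num)] at h0
      exact not_not.mpr h0
    rw [if_neg hpar, if_neg hpar']; ring

-- ===== VERDICT (by name: the statement is the Claim_ definition above) =====
theorem alternating_ones_and_zeroes_spec : Claim_equal_alternating_ones_and_zeroes := by
  intro chromosome _
  unfold Spec_alternating_ones_and_zeroes
  rw [pvAlt_eq, alternating_ones_and_zeroes, pvFoldA_eq]
  rw [PySem.Int.mod_eq_emod_of_pos (by norm_num)]
  norm_num
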